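-- pv_equiv track=rewrite | github.com/p-lots/codewars | 7-kyu/strings--swap-vowels'-case/python/solution.py | swap_vowel_case
-- ===== SOURCE A (Python) =====
-- def swap_vowel_case(st):
--     ret = ''
--     for ch in st:
--         if ch.lower() in 'aeiou':
--             if ch.islower():
--                 ret += ch.upper()
--             else:
--                 ret += ch.lower()
--         else:
--             ret += ch
--     return ret
-- ===== SOURCE B (Python) =====
-- _TABLE = str.maketrans('aeiouAEIOU', 'AEIOUaeiou')
--
-- def swap_vowel_case(st):
--     return st.translate(_TABLE)
-- ===== Notes on version B (the rewrite author's own statement) =====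
-- stated objective: idiomatic
-- what changed: Replaces A's explicit character loop with islower/isupper branching and repeated string concatenation by a precomputed str.maketrans translation table applied in one C-level st.translate call.
import Mathlib
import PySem

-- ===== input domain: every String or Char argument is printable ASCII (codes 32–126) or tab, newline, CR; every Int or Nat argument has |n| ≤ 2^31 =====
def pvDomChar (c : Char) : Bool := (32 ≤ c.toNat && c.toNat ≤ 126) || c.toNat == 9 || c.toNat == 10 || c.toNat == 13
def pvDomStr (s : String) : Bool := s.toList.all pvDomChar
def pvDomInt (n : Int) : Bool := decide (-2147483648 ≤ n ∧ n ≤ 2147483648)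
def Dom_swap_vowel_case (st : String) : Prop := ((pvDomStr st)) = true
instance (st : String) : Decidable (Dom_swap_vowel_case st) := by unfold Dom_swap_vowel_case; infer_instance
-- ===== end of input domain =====

-- B replaces A's explicit branching loop by a precomputed vowel→swapped-case translation table applied in one pass (idiomatic).

-- ===== PORT A =====
-- A: loop over the characters, appending the case-swapped vowel or the unchanged character.
def swap_vowel_case (st : String) : String :=
  String.mk (st.toList.foldl (fun ret ch =>
    if PySem.Chars.isIn [PySem.Chars.lowerChar ch] "aeiou".toList then
      if PySem.Chars.islower ch then ret ++ [PySem.Chars.upperChar ch]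
      else ret ++ [PySem.Chars.lowerChar ch]
    else ret ++ [ch]) [])

-- ===== PORT B =====
-- B: the str.maketrans table as an association list; translate = map with table lookup (identity default).
def pvSwapTable : List (Char × Char) :=
  [('a','A'),('e','E'),('i','I'),('o','O'),('u','U'),
   ('A','a'),('E','e'),('I','i'),('O','o'),('U','u')]

def swap_vowel_case_alt (st : String) : String :=
  String.mk (st.toList.map (fun c => (pvSwapTable.lookup c).getD c))

-- ===== PRECONDITION & SPEC =====
def Spec_swap_vowel_case (st : String) (out : String) : Prop := out = swap_vowel_case_alt st
instance (st : String) (out : String) : Decidable (Spec_swap_vowel_case st out) := by unfold Spec_swap_vowel_case; infer_instance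

-- ===== CLAIM (what is proved, stated in full; the proofs are below) =====
def Claim_equal_swap_vowel_case : Prop := ∀ (st : String), Dom_swap_vowel_case st → Spec_swap_vowel_case st (swap_vowel_case st)

-- ===== LEMMAS AND PROOFS =====

-- A's per-character step, factored out for the proof.
def pvStepA (ch : Char) : Char :=
  if PySem.Chars.isIn [PySem.Chars.lowerChar ch] "aeiou".toList then
    if PySem.Chars.islower ch then PySem.Chars.upperChar ch
    else PySem.Chars.lowerChar ch
  else ch

-- On every domain character the two per-character transforms agree (checked over all 127 codes).
set_option maxRecDepth 4000 in
theorem pvStep_eq (c : Char) (h : pvDomChar c = true) :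
    pvStepA c = (pvSwapTable.lookup c).getD c := by
  have hlt : c.toNat < 127 := by
    unfold pvDomChar at h
    simp only [Bool.or_eq_true, Bool.and_eq_true, beq_iff_eq, decide_eq_true_eq] at h
    omega
  have hall : ∀ n ∈ List.range 127,
      (pvStepA (Char.ofNat n) == ((pvSwapTable.lookup (Char.ofNat n)).getD (Char.ofNat n))) = true := by
    decide
  have := hall c.toNat (List.mem_range.mpr hlt)
  rwa [Char.ofNat_toNat, beq_iff_eq] at this

theorem pvFoldA (l : List Char) (acc : List Char) (h : l.all pvDomChar = true) :
    l.foldl (fun ret ch =>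
      if PySem.Chars.isIn [PySem.Chars.lowerChar ch] "aeiou".toList then
        if PySem.Chars.islower ch then ret ++ [PySem.Chars.upperChar ch]
        else ret ++ [PySem.Chars.lowerChar ch]
      else ret ++ [ch]) acc
    = acc ++ l.map (fun c => (pvSwapTable.lookup c).getD c) := by
  induction l generalizing acc with
  | nil => simp
  | cons c t ih =>
    simp only [List.all_cons, Bool.and_eq_true] at h
    have hc := pvStep_eq c h.1
    simp only [List.foldl_cons, List.map_cons]
    rw [ih _ h.2]
    have : (if PySem.Chars.isIn [PySem.Chars.lowerChar c] "aeiou".toList then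
        if PySem.Chars.islower c then acc ++ [PySem.Chars.upperChar c]
        else acc ++ [PySem.Chars.lowerChar c]
      else acc ++ [c]) = acc ++ [pvStepA c] := by
      unfold pvStepA; split_ifs <;> rfl
    rw [this, hc]
    simp

-- ===== VERDICT (by name: the statement is the Claim_ definition above) =====
theorem swap_vowel_case_spec : Claim_equal_swap_vowel_case := by
  intro st hdom
  unfold Spec_swap_vowel_case swap_vowel_case swap_vowel_case_alt
  rw [pvFoldA _ _ hdom]
  simp
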